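-- pv_equiv track=rewrite | github.com/moon9H/PrepareForCodingTest | 프로그래머스/1/67256. ［카카오 인턴］ 키패드 누르기/［카카오 인턴］ 키패드 누르기.py | solution
-- ===== SOURCE A (Python) =====
-- from collections import deque
--
-- def bfs_shortest_path(grid, start, goal):
--     # 방향 벡터 (상, 하, 좌, 우)
--     directions = [(-1, 0), (1, 0), (0, -1), (0, 1)]
--
--     # 행렬의 크기
--     rows, cols = len(grid), len(grid[0])
--
--     # BFS를 위한 큐 초기화
--     queue = deque([(start, 0)])  # (현재 위치, 현재까지의 거리)
--     visited = set()  # 방문한 위치를 저장하는 집합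
--     visited.add(start)
--
--     while queue:
--         (current, distance) = queue.popleft()
--
--         # 현재 위치가 목표 지점이면 거리 반환
--         if current == goal:
--             return distance
--
--         # 상하좌우로 이동
--         for direction in directions:
--             next_row = current[0] + direction[0]
--             next_col = current[1] + direction[1]
--             next_pos = (next_row, next_col)
--
--             # 다음 위치가 유효한 위치인지 확인
--             if (0 <= next_row < rows and
--                 0 <= next_col < cols and
--                 next_pos not in visited and
--                 grid[next_row][next_col] == 1):  # 이동 가능한 위치인지 확인
--
--                 visited.add(next_pos)
--                 queue.append((next_pos, distance + 1))
--
--     # 목표 지점에 도달할 수 없는 경우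
--     return -1
--
-- def numIntoPos(num) :
--     if num == 0 :
--         return (3, 1)
--     else :
--         if num == 1 :
--             return (0, 0)
--         elif num == 2 :
--             return (0, 1)
--         elif num == 3 :
--             return (0, 2)
--         elif num == 4 :
--             return (1, 0)
--         elif num == 5 :
--             return (1, 1)
--         elif num == 6 :
--             return (1, 2)
--         elif num == 7 :
--             return (2, 0)
--         elif num == 8 :
--             return (2, 1)
--         elif num == 9 :
--             return (2, 2)
--
-- def solution(numbers, hand):
--     answer = ''
--     hand_use = []
--     left_hand_pos = (3, 0)
--     right_hand_pos = (3, 2)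
--     hand_pos = [[1] * 3] * 4
--     for num in numbers :
--         press_pos = numIntoPos(num)
--         if num in {1, 4, 7} :
--             hand_use.append('L')
--             left_hand_pos = press_pos
--         elif num in {3, 6, 9} :
--             hand_use.append('R')
--             right_hand_pos = press_pos
--         elif num in {2, 5, 8, 0} :
--             left_distance = bfs_shortest_path(hand_pos, left_hand_pos, press_pos)
--             right_distance = bfs_shortest_path(hand_pos, right_hand_pos, press_pos)
--             if left_distance == right_distance :
--                 if hand == 'right' :
--                     hand_use.append('R')
--                     right_hand_pos = press_pos
--                 elif hand == 'left' :
--                     hand_use.append('L')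
--                     left_hand_pos = press_pos
--             elif left_distance > right_distance :
--                 hand_use.append('R')
--                 right_hand_pos = press_pos
--             else :
--                 hand_use.append('L')
--                 left_hand_pos = press_pos
--
--     answer = ''.join(hand_use)
--     return answer
-- ===== SOURCE B (Python) =====
-- POS = {1: (0, 0), 2: (0, 1), 3: (0, 2),
--        4: (1, 0), 5: (1, 1), 6: (1, 2),
--        7: (2, 0), 8: (2, 1), 9: (2, 2),
--        0: (3, 1)}
--
--
-- def solution(numbers, hand):
--     left, right = (3, 0), (3, 2)
--     out = []
--     for n in numbers:
--         if n in (1, 4, 7):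
--             out.append('L')
--             left = POS[n]
--         elif n in (3, 6, 9):
--             out.append('R')
--             right = POS[n]
--         elif n in (2, 5, 8, 0):
--             p = POS[n]
--             dl = abs(left[0] - p[0]) + abs(left[1] - p[1])
--             dr = abs(right[0] - p[0]) + abs(right[1] - p[1])
--             if dl < dr:
--                 out.append('L')
--                 left = p
--             elif dr < dl:
--                 out.append('R')
--                 right = p
--             elif hand == 'right':
--                 out.append('R')
--                 right = p
--             elif hand == 'left':
--                 out.append('L')
--                 left = p
--     return ''.join(out)
-- ===== Notes on version B (the rewrite author's own statement) =====
-- stated objective: simpler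
-- what changed: Replaced the per-keypress BFS over the all-open 4x3 keypad grid (queue + visited set) by direct Manhattan-distance arithmetic on the key coordinates, and the if-elif position table by a dict constant.
import Mathlib
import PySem

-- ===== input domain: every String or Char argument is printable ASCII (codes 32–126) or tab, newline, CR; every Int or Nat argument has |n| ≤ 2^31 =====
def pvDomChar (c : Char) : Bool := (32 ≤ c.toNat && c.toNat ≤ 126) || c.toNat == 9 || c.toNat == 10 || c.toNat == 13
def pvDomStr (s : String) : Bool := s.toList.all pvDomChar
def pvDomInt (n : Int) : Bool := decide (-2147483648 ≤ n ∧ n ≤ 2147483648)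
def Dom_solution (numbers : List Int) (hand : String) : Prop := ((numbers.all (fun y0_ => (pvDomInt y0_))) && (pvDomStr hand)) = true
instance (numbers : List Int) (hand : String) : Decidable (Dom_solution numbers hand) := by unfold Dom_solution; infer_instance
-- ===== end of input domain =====

-- B replaces A's per-keypress BFS on the all-open 4x3 grid by Manhattan-distance arithmetic (objective: simpler).

-- ===== PORT A =====

-- BFS on the grid, transliterated. `fuel` only makes the recursion structural: on the
-- 4x3 all-open grid every cell is enqueued at most once (visited-set check), so the loop
-- runs at most 13 iterations and fuel 100 is never exhausted.
def bfsLoop (grid : List (List Int)) (goal : Int × Int)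
    (queue : List ((Int × Int) × Int)) (visited : PySem.Set (Int × Int)) (fuel : Nat) : Int :=
  match fuel, queue with
  | 0, _ => -1
  | _, [] => -1
  | fuel + 1, (current, distance) :: rest =>
    if current = goal then distance
    else
      let rows : Int := PySem.List.len grid
      let cols : Int := PySem.List.len (PySem.List.pyGetD grid 0 [])
      let st := [((-1 : Int), (0 : Int)), (1, 0), (0, -1), (0, 1)].foldl
        (fun (st : List ((Int × Int) × Int) × PySem.Set (Int × Int)) dir =>
          let nr := current.1 + dir.1
          let nc := current.2 + dir.2
          let np := (nr, nc)
          if 0 ≤ nr ∧ nr < rows ∧ 0 ≤ nc ∧ nc < cols ∧ ¬ np ∈ st.2 ∧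
              PySem.List.pyGetD (PySem.List.pyGetD grid nr []) nc 0 = 1 then
            (st.1 ++ [(np, distance + 1)], PySem.Set.add st.2 np)
          else st) (rest, visited)
      bfsLoop grid goal st.1 st.2 fuel

def bfs_shortest_path (grid : List (List Int)) (start goal : Int × Int) : Int :=
  bfsLoop grid goal [(start, 0)] (PySem.Set.add PySem.Set.empty start) 100

-- returns none exactly where the Python returns None (num outside 0..9); the callers
-- below only read it (via getD) on nums where it is some, as in A.
def numIntoPos (num : Int) : Option (Int × Int) :=
  if num = 0 then some (3, 1)
  else if num = 1 then some (0, 0)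
  else if num = 2 then some (0, 1)
  else if num = 3 then some (0, 2)
  else if num = 4 then some (1, 0)
  else if num = 5 then some (1, 1)
  else if num = 6 then some (1, 2)
  else if num = 7 then some (2, 0)
  else if num = 8 then some (2, 1)
  else if num = 9 then some (2, 2)
  else none

def handPosGrid : List (List Int) := [[1, 1, 1], [1, 1, 1], [1, 1, 1], [1, 1, 1]]

def stepA (hand : String) (st : List String × (Int × Int) × (Int × Int)) (num : Int) :
    List String × (Int × Int) × (Int × Int) :=
  let press := (numIntoPos num).getD (0, 0)   -- only read in branches where numIntoPos num is some
  let hu := st.1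
  let L := st.2.1
  let R := st.2.2
  if num = 1 ∨ num = 4 ∨ num = 7 then (hu ++ ["L"], press, R)
  else if num = 3 ∨ num = 6 ∨ num = 9 then (hu ++ ["R"], L, press)
  else if num = 2 ∨ num = 5 ∨ num = 8 ∨ num = 0 then
    let left_distance := bfs_shortest_path handPosGrid L press
    let right_distance := bfs_shortest_path handPosGrid R press
    if left_distance = right_distance then
      if hand = "right" then (hu ++ ["R"], L, press)
      else if hand = "left" then (hu ++ ["L"], press, R)
      else (hu, L, R)
    else if left_distance > right_distance then (hu ++ ["R"], L, press)
    else (hu ++ ["L"], press, R)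
  else (hu, L, R)

def solution (numbers : List Int) (hand : String) : String :=
  let st := numbers.foldl (stepA hand) ([], (3, 0), (3, 2))
  PySem.Str.join "" st.1

-- ===== PORT B =====

def posDict : PySem.Dict Int (Int × Int) :=
  PySem.Dict.ofList [(1, (0, 0)), (2, (0, 1)), (3, (0, 2)),
                     (4, (1, 0)), (5, (1, 1)), (6, (1, 2)),
                     (7, (2, 0)), (8, (2, 1)), (9, (2, 2)),
                     (0, (3, 1))]

def stepB (hand : String) (st : List String × (Int × Int) × (Int × Int)) (n : Int) :
    List String × (Int × Int) × (Int × Int) :=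
  let out := st.1
  let left := st.2.1
  let right := st.2.2
  if n = 1 ∨ n = 4 ∨ n = 7 then (out ++ ["L"], (posDict.get? n).getD (0, 0), right)
  else if n = 3 ∨ n = 6 ∨ n = 9 then (out ++ ["R"], left, (posDict.get? n).getD (0, 0))
  else if n = 2 ∨ n = 5 ∨ n = 8 ∨ n = 0 then
    let p := (posDict.get? n).getD (0, 0)   -- key present in these branches
    let dl := |left.1 - p.1| + |left.2 - p.2|
    let dr := |right.1 - p.1| + |right.2 - p.2|
    if dl < dr then (out ++ ["L"], p, right)
    else if dr < dl then (out ++ ["R"], left, p)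
    else if hand = "right" then (out ++ ["R"], left, p)
    else if hand = "left" then (out ++ ["L"], p, right)
    else (out, left, right)
  else (out, left, right)

def solution_alt (numbers : List Int) (hand : String) : String :=
  let st := numbers.foldl (stepB hand) ([], (3, 0), (3, 2))
  PySem.Str.join "" st.1

-- ===== PRECONDITION & SPEC =====
def Spec_solution (numbers : List Int) (hand : String) (out : String) : Prop := out = solution_alt numbers hand
instance (numbers : List Int) (hand : String) (out : String) : Decidable (Spec_solution numbers hand out) := by unfold Spec_solution; infer_instance

-- ===== CLAIM (what is proved, stated in full; the proofs are below) =====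
def Claim_equal_solution : Prop := ∀ (numbers : List Int) (hand : String), Dom_solution numbers hand → Spec_solution numbers hand (solution numbers hand)

-- ===== LEMMAS AND PROOFS =====

-- hand positions stay inside the 4x3 grid
def InGrid (p : Int × Int) : Prop := 0 ≤ p.1 ∧ p.1 ≤ 3 ∧ 0 ≤ p.2 ∧ p.2 ≤ 2

-- BFS on the all-open 4x3 grid from any cell to a middle-column cell is the Manhattan distance
theorem bfs_eq_manhattan (L p : Int × Int) (hL : InGrid L)
    (hp : p = (0, 1) ∨ p = (1, 1) ∨ p = (2, 1) ∨ p = (3, 1)) :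
    bfs_shortest_path handPosGrid L p = |L.1 - p.1| + |L.2 - p.2| := by
  obtain ⟨r, c⟩ := L
  obtain ⟨h1, h2, h3, h4⟩ := hL
  simp only at h1 h2 h3 h4
  rcases hp with hp | hp | hp | hp <;> subst hp <;>
    interval_cases r <;> interval_cases c <;> decide

theorem step_eq (hand : String) (st : List String × (Int × Int) × (Int × Int)) (num : Int)
    (hL : InGrid st.2.1) (hR : InGrid st.2.2) :
    stepA hand st num = stepB hand st num ∧
      InGrid (stepA hand st num).2.1 ∧ InGrid (stepA hand st num).2.2 := by
  obtain ⟨hu, L, R⟩ := st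
  simp only at hL hR
  by_cases h1 : num = 1 ∨ num = 4 ∨ num = 7
  · have hg : InGrid ((numIntoPos num).getD (0, 0)) := by
      rcases h1 with h | h | h <;> subst h <;> norm_num [numIntoPos, InGrid]
    have hpd : (numIntoPos num).getD (0, 0) = (posDict.get? num).getD (0, 0) := by
      rcases h1 with h | h | h <;> subst h <;> decide
    simp only [stepA, stepB, if_pos h1]
    exact ⟨by rw [hpd], hg, hR⟩
  · by_cases h2 : num = 3 ∨ num = 6 ∨ num = 9
    · have hg : InGrid ((numIntoPos num).getD (0, 0)) := by
        rcases h2 with h | h | h <;> subst h <;> norm_num [numIntoPos, InGrid]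
      have hpd : (numIntoPos num).getD (0, 0) = (posDict.get? num).getD (0, 0) := by
        rcases h2 with h | h | h <;> subst h <;> decide
      simp only [stepA, stepB, if_neg h1, if_pos h2]
      exact ⟨by rw [hpd], hL, hg⟩
    · by_cases h3 : num = 2 ∨ num = 5 ∨ num = 8 ∨ num = 0
      · -- middle-column press: BFS distance = Manhattan distance
        have hpd : (numIntoPos num).getD (0, 0) = (posDict.get? num).getD (0, 0) := by
          rcases h3 with h | h | h | h <;> subst h <;> decide
        have hmid : (numIntoPos num).getD (0, 0) = (0, 1) ∨ (numIntoPos num).getD (0, 0) = (1, 1) ∨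
            (numIntoPos num).getD (0, 0) = (2, 1) ∨ (numIntoPos num).getD (0, 0) = (3, 1) := by
          rcases h3 with h | h | h | h <;> subst h <;> decide
        have hgrid : InGrid ((numIntoPos num).getD (0, 0)) := by
          rcases hmid with h | h | h | h <;> rw [h] <;> norm_num [InGrid]
        have hld := bfs_eq_manhattan L ((numIntoPos num).getD (0, 0)) hL hmid
        have hrd := bfs_eq_manhattan R ((numIntoPos num).getD (0, 0)) hR hmid
        simp only [stepA, stepB, if_neg h1, if_neg h2, if_pos h3, ← hpd, hld, hrd]
        refine ⟨?_, ?_, ?_⟩ <;>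
          split_ifs <;>
            first
              | rfl
              | exact hL
              | exact hR
              | exact hgrid
              | (exfalso; omega)
      · simp only [stepA, stepB, if_neg h1, if_neg h2, if_neg h3]
        exact ⟨trivial, hL, hR⟩

theorem foldl_step_eq (hand : String) (numbers : List Int)
    (st : List String × (Int × Int) × (Int × Int)) (hL : InGrid st.2.1) (hR : InGrid st.2.2) :
    numbers.foldl (stepA hand) st = numbers.foldl (stepB hand) st := by
  induction numbers generalizing st with
  | nil => rfl
  | cons n ns ih =>
    obtain ⟨heq, hL', hR'⟩ := step_eq hand st n hL hR
    simp only [List.foldl_cons, heq]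
    rw [← heq]
    exact ih _ hL' hR'

-- ===== VERDICT (by name: the statement is the Claim_ definition above) =====
theorem solution_spec : Claim_equal_solution := by
  intro numbers hand _
  unfold Spec_solution solution solution_alt
  rw [foldl_step_eq hand numbers ([], (3, 0), (3, 2)) (by norm_num [InGrid]) (by norm_num [InGrid])]
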